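-- pv_equiv track=rewrite | github.com/zxchurma2006/Dz_informatichs_2_sem | 2 сем звездочка.py | z_to_prefix
-- ===== SOURCE A (Python) =====
-- def z_to_prefix(z):
--     n = len(z)
--     s = [0] * n
--     s[0] = 'a'
--     c = ord('b')
--
--     for i in range(1, n):
--         if z[i] > 0:
--             for j in range(i, i + z[i]):
--                 if j < n and s[j] == 0:
--                     s[j] = s[j - i]
--         if s[i] == 0:
--             s[i] = chr(c)
--             c += 1
--     prefix = [0] * n
--
--     for i in range(1, n):
--         j = prefix[i - 1]
--         while j > 0 and s[i] != s[j]: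
--             j = prefix[j - 1]
--         if s[i] == s[j]:
--             j += 1
--         prefix[i] = j
--     return prefix
-- ===== SOURCE B (Python) =====
-- def _is_border(s, i, k):
--     # k-length border check for the prefix s[0:i+1], by direct character comparison
--     for t in range(k):
--         if s[t] != s[i + 1 - k + t]:
--             return False
--     return True
--
--
-- def z_to_prefix(z):
--     n = len(z)
--     if n == 0:
--         return []
--     # Reconstruct the string by appending only: the filled region is always a
--     # prefix, so each interval [i, i+z[i]) only ever extends the current end.
--     s = ['a']
--     code = ord('b')
--     for i in range(1, n):
--         e = min(n, i + z[i])
--         while len(s) < e: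
--             s.append(s[len(s) - i])
--         if len(s) == i:
--             s.append(chr(code))
--             code += 1
--     # Prefix function from its definition: for each i take the longest k with
--     # s[0:k] == s[i+1-k:i+1], searching k downward from i.
--     p = [0]
--     for i in range(1, n):
--         k = i
--         while k > 0 and not _is_border(s, i, k):
--             k -= 1
--         p.append(k)
--     return p
-- ===== Notes on version B (the rewrite author's own statement) =====
-- stated objective: alternative
-- what changed: Reconstruction is append-only (the filled region is always a prefix, so intervals only ever extend the end, never rescan), and the prefix function is computed from its definition -- for each i the longest k with s[0:k] == s[i+1-k:i+1], searched downward -- instead of A's KMP failure-link recursion; B trades A's amortized prefix loop for a definitional border search.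
import Mathlib
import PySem

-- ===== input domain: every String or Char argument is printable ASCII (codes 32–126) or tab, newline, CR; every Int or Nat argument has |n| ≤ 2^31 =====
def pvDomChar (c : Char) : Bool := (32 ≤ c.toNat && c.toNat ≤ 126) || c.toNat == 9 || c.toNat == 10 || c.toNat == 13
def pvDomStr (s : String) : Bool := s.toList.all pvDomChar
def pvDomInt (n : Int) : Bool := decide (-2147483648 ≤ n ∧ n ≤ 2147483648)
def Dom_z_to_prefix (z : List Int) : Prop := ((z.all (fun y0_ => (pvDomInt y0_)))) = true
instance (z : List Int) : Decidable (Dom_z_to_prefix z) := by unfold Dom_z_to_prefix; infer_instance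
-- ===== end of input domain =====

-- B reconstructs the string by appending only and computes the prefix function from its
-- definition (longest k with s[0:k] == s[i+1-k:i+1], searched downward) instead of A's KMP
-- failure-link loop; characters are modelled by their code points (0 = the unfilled marker).

-- ===== PORT A =====
-- inner loop body: 'if j < n and s[j] == 0: s[j] = s[j - i]'
def aInner (n i : Int) (s : List Int) (j : Int) : List Int :=
  if j < n ∧ PySem.List.pyGetD s j 0 = 0 then
    PySem.List.pySetD s j (PySem.List.pyGetD s (j - i) 0)
  else s

-- body of the first 'for i in range(1, n)' loop, state (s, c)
def aStep (z : List Int) (n : Int) (sc : List Int × Int) (i : Int) : List Int × Int :=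
  let s := if 0 < PySem.List.pyGetD z i 0 then
      (PySem.List.pyRange i (i + PySem.List.pyGetD z i 0) 1).foldl (aInner n i) sc.1
    else sc.1
  if PySem.List.pyGetD s i 0 = 0 then (PySem.List.pySetD s i sc.2, sc.2 + 1) else (s, sc.2)

-- 'while j > 0 and s[i] != s[j]: j = prefix[j - 1]'.  fuel = n is exact: prefix values built by
-- this very loop satisfy prefix[k] ≤ k, so j strictly decreases and the loop runs < n times.
def fallA (pre s : List Int) (si : Int) : Nat → Int → Int
  | 0, j => j
  | fuel+1, j =>
      if 0 < j ∧ ¬ si = PySem.List.pyGetD s j 0 then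
        fallA pre s si fuel (PySem.List.pyGetD pre (j - 1) 0)
      else j

-- body of the second 'for i in range(1, n)' loop
def aPStep (s : List Int) (fuel : Nat) (pre : List Int) (i : Int) : List Int :=
  let j := fallA pre s (PySem.List.pyGetD s i 0) fuel (PySem.List.pyGetD pre (i - 1) 0)
  let j := if PySem.List.pyGetD s i 0 = PySem.List.pyGetD s j 0 then j + 1 else j
  PySem.List.pySetD pre i j

def z_to_prefix (z : List Int) : List Int :=
  let n : Int := (z.length : Int)
  let s0 := PySem.List.pySetD (List.replicate z.length (0 : Int)) 0 97
  let sc := (PySem.List.pyRange 1 n 1).foldl (aStep z (n : Int)) (s0, 98)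
  (PySem.List.pyRange 1 n 1).foldl (aPStep sc.1 z.length) (List.replicate z.length (0 : Int))

-- ===== PORT B =====
-- 'while len(s) < e: s.append(s[len(s) - i])'
def bExtend (i e : Int) (s : List Int) : List Int :=
  if _h : (s.length : Int) < e then
    bExtend i e (s ++ [PySem.List.pyGetD s ((s.length : Int) - i) 0])
  else s
termination_by (e - (s.length : Int)).toNat
decreasing_by simp only [List.length_append, List.length_cons, List.length_nil]; omega

-- body of B's reconstruction loop, state (s, code)
def bStep (z : List Int) (n : Int) (sc : List Int × Int) (i : Int) : List Int × Int :=
  let s := bExtend i (min n (i + PySem.List.pyGetD z i 0)) sc.1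
  if (s.length : Int) = i then (s ++ [sc.2], sc.2 + 1) else (s, sc.2)

-- '_is_border(s, i, k)': 'for t in range(k): if s[t] != s[i+1-k+t]: return False / return True'
def isBord (s : List Int) (i k : Int) : Bool :=
  (PySem.List.pyRange 0 k 1).all
    (fun t => PySem.List.pyGetD s t 0 == PySem.List.pyGetD s (i + 1 - k + t) 0)

-- 'while k > 0 and not _is_border(s, i, k): k -= 1'
def bFind (s : List Int) (i k : Int) : Int :=
  if h : 0 < k ∧ isBord s i k = false then bFind s i (k - 1) else k
termination_by k.toNat
decreasing_by omega

-- body of B's prefix loop: 'p.append(k)' after the downward search starting at k = i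
def bPStep (s : List Int) (p : List Int) (i : Int) : List Int := p ++ [bFind s i i]

def z_to_prefix_alt (z : List Int) : List Int :=
  if z.length = 0 then [] else
  let n : Int := (z.length : Int)
  let sc := (PySem.List.pyRange 1 n 1).foldl (bStep z (n : Int)) ([97], 98)
  (PySem.List.pyRange 1 n 1).foldl (bPStep sc.1) [0]

-- ===== PRECONDITION & SPEC =====
-- position i ≥ 1 gets a fresh letter iff z[i] ≤ 0 and no earlier interval [j, j+z[j]) reaches it
def pvFreshB (z : List Int) (i : Nat) : Bool :=
  decide (PySem.List.pyGetD z (i : Int) 0 ≤ 0) &&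
  (List.range i).all (fun j => decide (j = 0) ||
    decide ((j : Int) + PySem.List.pyGetD z (j : Int) 0 ≤ (i : Int)))

-- Pre_ excludes exactly the inputs on which Python A raises: the empty list (IndexError on
-- 's[0] = ...') and inputs whose reconstruction needs more than 1114014 fresh letters beyond
-- 'a', on which chr(c) raises ValueError (B raises there too, needing the same fresh letters).
def Pre_z_to_prefix (z : List Int) : Prop :=
  z ≠ [] ∧
  ((List.range z.length).filter (fun i => decide (1 ≤ i) && pvFreshB z i)).length ≤ 1114014
instance (z : List Int) : Decidable (Pre_z_to_prefix z) := by unfold Pre_z_to_prefix; infer_instance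

def pvWitness_z_to_prefix : List Int := [0, 2, 0, 1]

def Spec_z_to_prefix (z : List Int) (out : List Int) : Prop := out = z_to_prefix_alt z
instance (z : List Int) (out : List Int) : Decidable (Spec_z_to_prefix z out) := by unfold Spec_z_to_prefix; infer_instance

-- ===== CLAIM (what is proved, stated in full; the proofs are below) =====
def Claim_equal_z_to_prefix : Prop := ∀ (z : List Int), Dom_z_to_prefix z → Pre_z_to_prefix z → Spec_z_to_prefix z (z_to_prefix z)

-- ===== LEMMAS AND PROOFS =====

-- A's working arrays are B's growing lists padded with zeros up to length n.
def pvPad (n : Nat) (s : List Int) : List Int := s ++ List.replicate (n - s.length) 0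

lemma pad_eq_self {n : Nat} {s : List Int} (h : s.length = n) : pvPad n s = s := by
  simp [pvPad, h]

lemma length_pvPad {n : Nat} {s : List Int} (h : s.length ≤ n) : (pvPad n s).length = n := by
  simp [pvPad]; omega

lemma getD_append_lt {s t : List Int} {k : Int} {d : Int} (h0 : 0 ≤ k)
    (h1 : k < (s.length : Int)) :
    PySem.List.pyGetD (s ++ t) k d = PySem.List.pyGetD s k d := by
  have hk : k.toNat < s.length := by omega
  rw [PySem.List.pyGetD_eq_getElem (s ++ t) d h0 (by simp only [List.length_append]; omega),
      PySem.List.pyGetD_eq_getElem s d h0 h1]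
  exact List.getElem_append_left hk

lemma getD_pad_lt {n : Nat} {s : List Int} {k : Int} {d : Int} (h0 : 0 ≤ k)
    (h1 : k < (s.length : Int)) :
    PySem.List.pyGetD (pvPad n s) k d = PySem.List.pyGetD s k d := by
  unfold pvPad
  exact getD_append_lt h0 h1

lemma getD_pad_zero {n : Nat} {s : List Int} {k : Int} (h0 : (s.length : Int) ≤ k)
    (h1 : k < (n : Int)) (hle : s.length ≤ n) :
    PySem.List.pyGetD (pvPad n s) k 0 = 0 := by
  have hk0 : 0 ≤ k := le_trans (by positivity) h0
  rw [PySem.List.pyGetD_eq_getElem _ 0 hk0 (by rw [length_pvPad hle]; exact_mod_cast h1)]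
  unfold pvPad
  rw [List.getElem_append_right (by omega)]
  exact List.getElem_replicate _

lemma set_pad_at_len {n : Nat} (s : List Int) (v : Int) (h : s.length < n) :
    PySem.List.pySetD (pvPad n s) ((s.length : Nat) : Int) v = pvPad n (s ++ [v]) := by
  rw [PySem.List.pySetD_natCast]
  unfold pvPad
  rw [List.set_append_right _ _ (le_refl _)]
  have hr : n - s.length = (n - (s.length + 1)) + 1 := by omega
  simp [hr, List.replicate_succ, List.append_assoc]

lemma bExtend_of_le {i e : Int} {s : List Int} (h : e ≤ (s.length : Int)) :
    bExtend i e s = s := by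
  rw [bExtend, dif_neg (by omega)]

lemma bExtend_length (i e : Int) (s : List Int) :
    (bExtend i e s).length = max s.length e.toNat := by
  induction s using bExtend.induct (i := i) (e := e) with
  | case1 s h ih =>
      rw [bExtend, dif_pos h, ih]
      simp only [List.length_append, List.length_cons, List.length_nil]
      omega
  | case2 s h =>
      rw [bExtend, dif_neg h]
      omega

lemma bExtend_ne_zero (i e : Int) (s : List Int) (hi : 1 ≤ i) (hlen : i ≤ (s.length : Int))
    (hz : ∀ x ∈ s, x ≠ 0) : ∀ x ∈ bExtend i e s, x ≠ 0 := by
  induction s using bExtend.induct (i := i) (e := e) with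
  | case1 s h ih =>
      rw [bExtend, dif_pos h]
      apply ih (by simp only [List.length_append, List.length_cons, List.length_nil]; omega)
      intro x hx
      rcases List.mem_append.mp hx with hx | hx
      · exact hz x hx
      · have hv : PySem.List.pyGetD s ((s.length : Int) - i) 0 = s[((s.length : Int) - i).toNat] := by
          exact PySem.List.pyGetD_eq_getElem s 0 (by omega) (by omega)
        simp only [List.mem_singleton] at hx
        subst hx
        rw [hv]
        exact hz _ (List.getElem_mem _)
  | case2 s h =>
      rw [bExtend, dif_neg h]
      exact hz

-- A's interval rescan over the padded array equals B's append-only extension.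
lemma phase1_inner (n : Nat) (i t : Int) (hi : 1 ≤ i) :
    ∀ (l : Nat) (j : Int) (sb : List Int),
      (t - j).toNat = l → i ≤ j → i ≤ (sb.length : Int) → sb.length ≤ n →
      (∀ x ∈ sb, x ≠ 0) → (j ≤ (sb.length : Int) ∨ sb.length = n) →
      (PySem.List.pyRange j t 1).foldl (aInner (n : Int) i) (pvPad n sb) =
        pvPad n (bExtend i (min (n : Int) t) sb) := by
  intro l
  induction l with
  | zero =>
      intro j sb h0 hij hilen hlen hz hj
      have ht : t ≤ j := by omega
      have hmin : min (n : Int) t ≤ (sb.length : Int) := by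
        rcases hj with hj | hj <;> omega
      rw [PySem.List.pyRange_one_eq_nil ht, List.foldl_nil, bExtend_of_le hmin]
  | succ l ih =>
      intro j sb h0 hij hilen hlen hz hj
      have hjt : j < t := by omega
      rw [PySem.List.pyRange_one_cons hjt]
      simp only [List.foldl_cons]
      by_cases hcase : j < (sb.length : Int)
      · -- position j is already filled: the write is skipped
        have hnz : PySem.List.pyGetD (pvPad n sb) j 0 ≠ 0 := by
          rw [getD_pad_lt (by omega) hcase,
              PySem.List.pyGetD_eq_getElem sb 0 (by omega) hcase]
          exact hz _ (List.getElem_mem _)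
        rw [aInner, if_neg (by tauto)]
        exact ih (j + 1) sb (by omega) (by omega) hilen hlen hz (by omega)
      · by_cases hfull : sb.length = n
        · -- the whole array is filled: j ≥ n, the guard 'j < n' is false
          have hge : ¬ j < (n : Int) := by omega
          rw [aInner, if_neg (by tauto)]
          exact ih (j + 1) sb (by omega) (by omega) hilen hlen hz (Or.inr hfull)
        · -- j is exactly the first unfilled position: both sides append s[j - i]
          have hjlen : j = (sb.length : Int) := by omega
          have hlt : sb.length < n := by omega
          have hcond : j < (n : Int) ∧ PySem.List.pyGetD (pvPad n sb) j 0 = 0 := by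
            constructor
            · omega
            · exact getD_pad_zero (by omega) (by omega) hlen
          rw [aInner, if_pos hcond]
          have hv : PySem.List.pyGetD (pvPad n sb) (j - i) 0 =
              PySem.List.pyGetD sb ((sb.length : Int) - i) 0 := by
            rw [hjlen]
            exact getD_pad_lt (by omega) (by omega)
          rw [hv, hjlen, set_pad_at_len _ _ hlt]
          have hext : bExtend i (min (n : Int) t) sb =
              bExtend i (min (n : Int) t)
                (sb ++ [PySem.List.pyGetD sb ((sb.length : Int) - i) 0]) := by
            rw [bExtend, dif_pos (by omega)]
          rw [hext]
          have hz' : ∀ x ∈ sb ++ [PySem.List.pyGetD sb ((sb.length : Int) - i) 0], x ≠ 0 := by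
            intro x hx
            rcases List.mem_append.mp hx with hx | hx
            · exact hz x hx
            · simp only [List.mem_singleton] at hx
              subst hx
              rw [PySem.List.pyGetD_eq_getElem sb 0 (by omega) (by omega)]
              exact hz _ (List.getElem_mem _)
          exact ih ((sb.length : Int) + 1) (sb ++ [_]) (by omega) (by omega) (by simp only [List.length_append, List.length_cons, List.length_nil]; omega)
            (by simp only [List.length_append, List.length_cons, List.length_nil]; omega) hz' (by simp only [List.length_append, List.length_cons, List.length_nil]; omega)

-- Reconstruction phase: A's fold over the padded array tracks B's fold over the growing list.
lemma phase1 (z : List Int) (n : Nat) :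
    ∀ (l : Nat) (k : Int) (sb : List Int) (c : Int),
      ((n : Int) - k).toNat = l → 1 ≤ k → k ≤ (sb.length : Int) → sb.length ≤ n →
      (∀ x ∈ sb, x ≠ 0) → 98 ≤ c →
      ((PySem.List.pyRange k n 1).foldl (aStep z (n : Int)) (pvPad n sb, c)).1 =
          pvPad n (((PySem.List.pyRange k n 1).foldl (bStep z (n : Int)) (sb, c)).1) ∧
      ((PySem.List.pyRange k n 1).foldl (aStep z (n : Int)) (pvPad n sb, c)).2 =
          ((PySem.List.pyRange k n 1).foldl (bStep z (n : Int)) (sb, c)).2 ∧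
      ((PySem.List.pyRange k n 1).foldl (bStep z (n : Int)) (sb, c)).1.length = n ∧
      (∀ x ∈ ((PySem.List.pyRange k n 1).foldl (bStep z (n : Int)) (sb, c)).1, x ≠ 0) := by
  intro l
  induction l with
  | zero =>
      intro k sb c h0 hk hklen hlen hz hc
      have hnk : (n : Int) ≤ k := by omega
      have hfl : sb.length = n := by omega
      rw [PySem.List.pyRange_one_eq_nil hnk]
      exact ⟨by simp, by simp, by simpa using hfl, by simpa using hz⟩
  | succ l ih =>
      intro k sb c h0 hk hklen hlen hz hc
      have hkn : k < (n : Int) := by omega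
      rw [PySem.List.pyRange_one_cons hkn]
      simp only [List.foldl_cons]
      set zk := PySem.List.pyGetD z k 0 with hzk
      set e : Int := min (n : Int) (k + zk) with he
      set sE := bExtend k e sb with hsE
      have hAinner :
          (if 0 < zk then
              (PySem.List.pyRange k (k + zk) 1).foldl (aInner (n : Int) k) (pvPad n sb)
            else pvPad n sb) = pvPad n sE := by
        by_cases hpos : 0 < zk
        · rw [if_pos hpos]
          exact phase1_inner n k (k + zk) hk ((k + zk - k).toNat) k sb rfl (le_refl k)
            hklen hlen hz (Or.inl hklen)
        · rw [if_neg hpos, hsE, bExtend_of_le (by omega)]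
      have hElen : sE.length = max sb.length e.toNat := bExtend_length k e sb
      have hEle : sE.length ≤ n := by omega
      have hEge : k ≤ (sE.length : Int) := by omega
      have hEz : ∀ x ∈ sE, x ≠ 0 := bExtend_ne_zero k e sb hk hklen hz
      have hstepA : aStep z (n : Int) (pvPad n sb, c) k =
          (if PySem.List.pyGetD (pvPad n sE) k 0 = 0 then
              (PySem.List.pySetD (pvPad n sE) k c, c + 1) else (pvPad n sE, c)) := by
        simp only [aStep, ← hzk]
        rw [hAinner]
      have hstepB : bStep z (n : Int) (sb, c) k =
          (if (sE.length : Int) = k then (sE ++ [c], c + 1) else (sE, c)) := by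
        rw [bStep]
      rw [hstepA, hstepB]
      by_cases hfill : k < (sE.length : Int)
      · -- position k already filled: neither side writes
        have hnz : PySem.List.pyGetD (pvPad n sE) k 0 ≠ 0 := by
          rw [getD_pad_lt (by omega) hfill,
              PySem.List.pyGetD_eq_getElem sE 0 (by omega) hfill]
          exact hEz _ (List.getElem_mem _)
        rw [if_neg hnz, if_neg (by omega)]
        exact ih (k + 1) sE c (by omega) (by omega) hfill hEle hEz hc
      · -- position k empty: A writes chr(c), B appends it
        have hkE : k = (sE.length : Int) := by omega
        have hz0 : PySem.List.pyGetD (pvPad n sE) k 0 = 0 :=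
          getD_pad_zero (by omega) (by omega) hEle
        rw [if_pos hz0, if_pos hkE.symm, hkE, set_pad_at_len _ _ (by omega)]
        have hz' : ∀ x ∈ sE ++ [c], x ≠ 0 := by
          intro x hx
          rcases List.mem_append.mp hx with hx | hx
          · exact hEz x hx
          · simp only [List.mem_singleton] at hx; omega
        exact ih ((sE.length : Int) + 1) (sE ++ [c]) (c + 1) (by omega) (by omega) (by simp only [List.length_append, List.length_cons, List.length_nil]; omega)
          (by simp only [List.length_append, List.length_cons, List.length_nil]; omega) hz' (by omega)

-- ===== borders: the common mathematical description of both prefix computations =====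

-- 'k is a proper border length of the prefix of s of length m'
def pvBrd (s : List Int) (m k : Nat) : Bool :=
  decide (k < m) &&
  (List.range k).all (fun t =>
    PySem.List.pyGetD s (t : Int) 0 == PySem.List.pyGetD s ((m : Int) - (k : Int) + (t : Int)) 0)

-- the maximal proper border length of the prefix of length m
def pvMB (s : List Int) (m : Nat) : Nat := Nat.findGreatest (fun k => pvBrd s m k = true) (m - 1)

lemma pvBrd_iff (s : List Int) (m k : Nat) :
    pvBrd s m k = true ↔ k < m ∧ ∀ t : Nat, t < k →
      PySem.List.pyGetD s (t : Int) 0 = PySem.List.pyGetD s ((m : Int) - (k : Int) + (t : Int)) 0 := by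
  simp [pvBrd, List.all_eq_true, List.mem_range]

lemma pvBrd_zero (s : List Int) (m : Nat) (h : 1 ≤ m) : pvBrd s m 0 = true := by
  rw [pvBrd_iff]
  exact ⟨h, by omega⟩

-- nesting: inside a border a of the prefix of length m, smaller borders of m and of a coincide
lemma pvBrd_nest (s : List Int) (m a b : Nat) (ha : pvBrd s m a = true) (hb : b < a) :
    (pvBrd s m b = true ↔ pvBrd s a b = true) := by
  rw [pvBrd_iff] at ha ⊢
  rw [pvBrd_iff]
  obtain ⟨ham, hav⟩ := ha
  constructor
  · rintro ⟨-, hbv⟩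
    refine ⟨hb, fun t ht => ?_⟩
    have h1 := hav (a - b + t) (by omega)
    have h2 := hbv t ht
    have e1 : ((a - b + t : Nat) : Int) = (a : Int) - b + t := by omega
    have e2 : (m : Int) - a + ((a : Int) - b + t) = (m : Int) - b + t := by ring
    rw [e1, e2] at h1
    rw [h2, h1]
  · rintro ⟨-, hbv⟩
    refine ⟨by omega, fun t ht => ?_⟩
    have h1 := hav (a - b + t) (by omega)
    have h2 := hbv t ht
    have e1 : ((a - b + t : Nat) : Int) = (a : Int) - b + t := by omega
    have e2 : (m : Int) - a + ((a : Int) - b + t) = (m : Int) - b + t := by ring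
    rw [e1, e2] at h1
    rw [h2, h1]

-- extension: borders of the prefix of length m+1 of positive length are extended borders of m
lemma pvBrd_ext (s : List Int) (m k : Nat) :
    pvBrd s (m + 1) (k + 1) = true ↔
      (pvBrd s m k = true ∧ PySem.List.pyGetD s (k : Int) 0 = PySem.List.pyGetD s (m : Int) 0) := by
  rw [pvBrd_iff, pvBrd_iff]
  constructor
  · rintro ⟨h1, h2⟩
    have hkm : k < m := by omega
    refine ⟨⟨hkm, fun t ht => ?_⟩, ?_⟩
    · have h3 := h2 t (by omega)
      have e : ((m + 1 : Nat) : Int) - ((k + 1 : Nat) : Int) + t = (m : Int) - k + t := by omega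
      rwa [e] at h3
    · have h3 := h2 k (by omega)
      have e : ((m + 1 : Nat) : Int) - ((k + 1 : Nat) : Int) + k = (m : Int) := by omega
      rwa [e] at h3
  · rintro ⟨⟨hkm, hv⟩, hk⟩
    refine ⟨by omega, fun t ht => ?_⟩
    by_cases htk : t < k
    · have h3 := hv t htk
      have e : ((m + 1 : Nat) : Int) - ((k + 1 : Nat) : Int) + t = (m : Int) - k + t := by omega
      rwa [e]
    · have e : ((m + 1 : Nat) : Int) - ((k + 1 : Nat) : Int) + t = (m : Int) := by omega
      have hteq : t = k := by omega
      rw [e, hteq]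
      exact hk

lemma pvMB_brd (s : List Int) (m : Nat) (h : 1 ≤ m) : pvBrd s m (pvMB s m) = true :=
  Nat.findGreatest_spec (P := fun k => pvBrd s m k = true) (Nat.zero_le _) (pvBrd_zero s m h)

lemma pvMB_le (s : List Int) (m : Nat) : pvMB s m ≤ m - 1 := Nat.findGreatest_le _

lemma pvMB_ge (s : List Int) (m k : Nat) (h : pvBrd s m k = true) : k ≤ pvMB s m := by
  have hk : k ≤ m - 1 := by
    have := (pvBrd_iff s m k).mp h
    omega
  exact Nat.le_findGreatest hk h

-- B's border test agrees with pvBrd on the indices it is called at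
lemma isBord_eq_pvBrd (s : List Int) (i k : Nat) (hk : k ≤ i) :
    isBord s (i : Int) (k : Int) = pvBrd s (i + 1) k := by
  unfold isBord pvBrd
  rw [PySem.List.pyRange_zero_natCast, List.all_map,
      decide_eq_true (show k < i + 1 by omega), Bool.true_and]
  refine List.all_congr rfl (fun t => ?_)
  simp only [Function.comp_apply]
  have e : (i : Int) + 1 - (k : Int) + (t : Int) = ((i + 1 : Nat) : Int) - (k : Int) + (t : Int) := by
    omega
  rw [e]

-- B's downward search is Nat.findGreatest
lemma bFind_eq_findGreatest (s : List Int) (i : Nat) :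
    ∀ k : Nat, k ≤ i →
      bFind s (i : Int) (k : Int) =
        ((Nat.findGreatest (fun m => pvBrd s (i + 1) m = true) k : Nat) : Int) := by
  intro k
  induction k with
  | zero =>
      intro _
      rw [bFind, dif_neg (by simp)]
      simp [Nat.findGreatest_zero]
  | succ k ih =>
      intro hki
      rw [bFind]
      have hcast : ((k + 1 : Nat) : Int) - 1 = (k : Nat) := by push_cast; ring
      by_cases hb : pvBrd s (i + 1) (k + 1) = true
      · rw [dif_neg (by
          rw [isBord_eq_pvBrd s i (k + 1) hki, hb]
          simp)]
        rw [Nat.findGreatest_succ, if_pos hb]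
      · rw [dif_pos (by
          constructor
          · push_cast; omega
          · rw [isBord_eq_pvBrd s i (k + 1) hki]
            simpa using hb)]
        rw [hcast, ih (by omega), Nat.findGreatest_succ, if_neg hb]

lemma bFind_eq_pvMB (s : List Int) (i : Nat) :
    bFind s (i : Int) (i : Int) = ((pvMB s (i + 1) : Nat) : Int) := by
  rw [bFind_eq_findGreatest s i i (le_refl i)]
  unfold pvMB
  norm_num

-- A's failure-link loop, run on a table of maximal borders, finds the largest extendable border
lemma fallA_mb (s P : List Int) (n i : Nat)
    (hP : ∀ t (ht : t < P.length), P[t] = ((pvMB s (t + 1) : Nat) : Int))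
    (hlen : P.length = i) :
    ∀ (fuel j : Nat), j + 1 ≤ fuel → pvBrd s i j = true →
      (∀ k : Nat, pvBrd s i k = true →
        PySem.List.pyGetD s (k : Int) 0 = PySem.List.pyGetD s (i : Int) 0 → k ≤ j) →
      ∃ jF : Nat,
        fallA (pvPad n P) s (PySem.List.pyGetD s (i : Int) 0) fuel (j : Int) = (jF : Int) ∧
        pvBrd s i jF = true ∧
        (∀ k : Nat, pvBrd s i k = true →
          PySem.List.pyGetD s (k : Int) 0 = PySem.List.pyGetD s (i : Int) 0 → k ≤ jF) ∧
        (PySem.List.pyGetD s (jF : Int) 0 = PySem.List.pyGetD s (i : Int) 0 ∨ jF = 0) := by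
  intro fuel
  induction fuel with
  | zero => intro j hf; omega
  | succ fuel ih =>
      intro j hf hbrd hmax
      rw [fallA]
      by_cases hcond : 0 < (j : Int) ∧
          ¬ PySem.List.pyGetD s (i : Int) 0 = PySem.List.pyGetD s (j : Int) 0
      · rw [if_pos hcond]
        have hj1 : 1 ≤ j := by omega
        have hji : j < i := by
          have := (pvBrd_iff s i j).mp hbrd
          omega
        -- the failure link read from the table is the maximal border of the prefix of length j
        have hread : PySem.List.pyGetD (pvPad n P) ((j : Int) - 1) 0 = ((pvMB s j : Nat) : Int) := by
          have h1 : PySem.List.pyGetD (pvPad n P) ((j : Int) - 1) 0 =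
              PySem.List.pyGetD P ((j : Int) - 1) 0 :=
            getD_pad_lt (by omega) (by omega)
          have h2 : PySem.List.pyGetD P ((j : Int) - 1) 0 = P[((j : Int) - 1).toNat] :=
            PySem.List.pyGetD_eq_getElem P 0 (by omega) (by omega)
          have h3 := hP ((j : Int) - 1).toNat (by omega)
          have h4 : ((j : Int) - 1).toNat + 1 = j := by omega
          rw [h1, h2, h3, h4]
        rw [hread]
        set j' := pvMB s j with hj'
        have hj'lt : j' < j := by
          have := pvMB_le s j
          omega
        have hbrd' : pvBrd s i j' = true :=
          (pvBrd_nest s i j j' hbrd hj'lt).mpr (pvMB_brd s j hj1)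
        have hmax' : ∀ k : Nat, pvBrd s i k = true →
            PySem.List.pyGetD s (k : Int) 0 = PySem.List.pyGetD s (i : Int) 0 → k ≤ j' := by
          intro k hk hgk
          have hkj : k ≤ j := hmax k hk hgk
          have hkne : k ≠ j := by
            intro he
            subst he
            exact hcond.2 hgk.symm
          have hklt : k < j := by omega
          exact pvMB_ge s j k ((pvBrd_nest s i j k hbrd hklt).mp hk)
        exact ih j' (by omega) hbrd' hmax'
      · rw [if_neg hcond]
        refine ⟨j, rfl, hbrd, hmax, ?_⟩
        rcases not_and_or.mp hcond with h | h
        · right; omega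
        · left
          exact (not_not.mp h).symm

-- one step of A's prefix loop appends the maximal border of the next prefix
lemma kmp_step (s P : List Int) (n i : Nat) (h1 : 1 ≤ i) (hin : i < n) (hlen : P.length = i)
    (hP : ∀ t (ht : t < P.length), P[t] = ((pvMB s (t + 1) : Nat) : Int)) :
    aPStep s n (pvPad n P) (i : Int) = pvPad n (P ++ [((pvMB s (i + 1) : Nat) : Int)]) := by
  unfold aPStep
  -- the initial j is the maximal border of the prefix of length i
  have hread : PySem.List.pyGetD (pvPad n P) ((i : Int) - 1) 0 = ((pvMB s i : Nat) : Int) := by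
    have ha : PySem.List.pyGetD (pvPad n P) ((i : Int) - 1) 0 =
        PySem.List.pyGetD P ((i : Int) - 1) 0 := getD_pad_lt (by omega) (by omega)
    have hb : PySem.List.pyGetD P ((i : Int) - 1) 0 = P[((i : Int) - 1).toNat] :=
      PySem.List.pyGetD_eq_getElem P 0 (by omega) (by omega)
    have hc := hP ((i : Int) - 1).toNat (by omega)
    have hd : ((i : Int) - 1).toNat + 1 = i := by omega
    rw [ha, hb, hc, hd]
  have hj0brd : pvBrd s i (pvMB s i) = true := pvMB_brd s i h1
  have hj0max : ∀ k : Nat, pvBrd s i k = true →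
      PySem.List.pyGetD s (k : Int) 0 = PySem.List.pyGetD s (i : Int) 0 → k ≤ pvMB s i :=
    fun k hk _ => pvMB_ge s i k hk
  have hfuel : pvMB s i + 1 ≤ n := by
    have := pvMB_le s i
    omega
  obtain ⟨jF, hF, hFbrd, hFmax, hFend⟩ := fallA_mb s P n i hP hlen n (pvMB s i) hfuel hj0brd hj0max
  simp only [hread, hF]
  have hjFi : jF < i := by
    have := (pvBrd_iff s i jF).mp hFbrd
    omega
  by_cases hgi : PySem.List.pyGetD s (i : Int) 0 = PySem.List.pyGetD s (jF : Int) 0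
  · rw [if_pos hgi]
    -- pvMB s (i+1) = jF + 1
    have hup : pvBrd s (i + 1) (jF + 1) = true :=
      (pvBrd_ext s i jF).mpr ⟨hFbrd, hgi.symm⟩
    have hge : jF + 1 ≤ pvMB s (i + 1) := pvMB_ge s (i + 1) (jF + 1) hup
    have hle : pvMB s (i + 1) ≤ jF + 1 := by
      have hMbrd : pvBrd s (i + 1) (pvMB s (i + 1)) = true := pvMB_brd s (i + 1) (by omega)
      rcases Nat.eq_zero_or_pos (pvMB s (i + 1)) with hM0 | hMp
      · omega
      · obtain ⟨k, hk⟩ : ∃ k, pvMB s (i + 1) = k + 1 := ⟨pvMB s (i + 1) - 1, by omega⟩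
        rw [hk] at hMbrd
        obtain ⟨hkb, hkg⟩ := (pvBrd_ext s i k).mp hMbrd
        have := hFmax k hkb hkg
        omega
    have heq : pvMB s (i + 1) = jF + 1 := le_antisymm hle hge
    have hcast : (jF : Int) + 1 = ((pvMB s (i + 1) : Nat) : Int) := by
      rw [heq]; push_cast; ring
    rw [hcast, ← hlen, set_pad_at_len P _ (by omega)]
  · rw [if_neg hgi]
    have hjF0 : jF = 0 := by
      rcases hFend with h | h
      · exact absurd h.symm hgi
      · exact h
    -- pvMB s (i+1) = 0
    have hM0 : pvMB s (i + 1) = 0 := by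
      by_contra hM
      obtain ⟨k, hk⟩ : ∃ k, pvMB s (i + 1) = k + 1 := ⟨pvMB s (i + 1) - 1, by omega⟩
      have hMbrd : pvBrd s (i + 1) (pvMB s (i + 1)) = true := pvMB_brd s (i + 1) (by omega)
      rw [hk] at hMbrd
      obtain ⟨hkb, hkg⟩ := (pvBrd_ext s i k).mp hMbrd
      have hk0 : k = 0 := by
        have := hFmax k hkb hkg
        omega
      subst hk0
      subst hjF0
      exact hgi hkg.symm
    have hcast : (jF : Int) = ((pvMB s (i + 1) : Nat) : Int) := by
      rw [hM0, hjF0]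
    rw [hcast, ← hlen, set_pad_at_len P _ (by omega)]

-- one step of B's prefix loop appends the same maximal border
lemma naive_step (s P : List Int) (i : Nat) :
    bPStep s P (i : Int) = P ++ [((pvMB s (i + 1) : Nat) : Int)] := by
  unfold bPStep
  rw [bFind_eq_pvMB]

-- Prefix phase: A's fold over the padded array equals B's fold over the growing list.
lemma phase2 (s : List Int) (n : Nat) :
    ∀ (l k : Nat) (P : List Int), n - k = l → 1 ≤ k → P.length = k → k ≤ n →
      (∀ t (ht : t < P.length), P[t] = ((pvMB s (t + 1) : Nat) : Int)) →
      (PySem.List.pyRange (k : Int) (n : Int) 1).foldl (aPStep s n) (pvPad n P) =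
        pvPad n ((PySem.List.pyRange (k : Int) (n : Int) 1).foldl (bPStep s) P) ∧
      ((PySem.List.pyRange (k : Int) (n : Int) 1).foldl (bPStep s) P).length = n := by
  intro l
  induction l with
  | zero =>
      intro k P h0 hk hlen hkn hP
      have hnk : (n : Int) ≤ (k : Int) := by omega
      rw [PySem.List.pyRange_one_eq_nil hnk]
      exact ⟨by simp only [List.foldl_nil], by simp only [List.foldl_nil]; omega⟩
  | succ l ih =>
      intro k P h0 hk hlen hkn hP
      have hkn' : (k : Int) < (n : Int) := by omega
      rw [PySem.List.pyRange_one_cons hkn']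
      simp only [List.foldl_cons]
      rw [kmp_step s P n k hk (by omega) hlen hP, naive_step s P k]
      have hcast : (k : Int) + 1 = ((k + 1 : Nat) : Int) := by push_cast; ring
      rw [hcast]
      apply ih (k + 1) (P ++ [((pvMB s (k + 1) : Nat) : Int)]) (by omega) (by omega)
        (by simp only [List.length_append, List.length_cons, List.length_nil]; omega) (by omega)
      intro t ht
      simp only [List.length_append, List.length_cons, List.length_nil] at ht
      by_cases htl : t < P.length
      · rw [List.getElem_append_left htl]
        exact hP t htl
      · have hte : t = P.length := by omega
        subst hte
        rw [List.getElem_append_right (le_refl _)]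
        simp only [Nat.sub_self, List.getElem_cons_zero]
        rw [hlen]

lemma replicate_set_eq_pad (n : Nat) (hn : 1 ≤ n) (v : Int) :
    (List.replicate n (0 : Int)).set 0 v = pvPad n [v] := by
  obtain ⟨m, rfl⟩ : ∃ m, n = m + 1 := ⟨n - 1, by omega⟩
  simp [List.replicate_succ, pvPad]

lemma replicate_eq_pad (n : Nat) (hn : 1 ≤ n) :
    List.replicate n (0 : Int) = pvPad n [(0 : Int)] := by
  obtain ⟨m, rfl⟩ : ∃ m, n = m + 1 := ⟨n - 1, by omega⟩
  simp [List.replicate_succ, pvPad]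

-- ===== VERDICT (by name: the statement is the Claim_ definition above) =====
theorem z_to_prefix_spec : Claim_equal_z_to_prefix := by
  intro z _hdom hpre
  obtain ⟨hne, _⟩ := hpre
  have hn : 1 ≤ z.length := List.length_pos_of_ne_nil hne
  unfold Spec_z_to_prefix z_to_prefix z_to_prefix_alt
  rw [if_neg (by omega)]
  simp only []
  -- initial states of the reconstruction fold
  have h0 : PySem.List.pySetD (List.replicate z.length (0 : Int)) 0 97 =
      pvPad z.length [97] := by
    rw [show (0 : Int) = ((0 : Nat) : Int) from rfl, PySem.List.pySetD_natCast]
    exact replicate_set_eq_pad z.length hn 97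
  obtain ⟨hs, hc, hslen, _⟩ := phase1 z z.length (((z.length : Int) - 1).toNat) 1 [97] 98
    rfl (by omega) (by simp) (by simp only [List.length_cons, List.length_nil]; omega) (by simp) (by omega)
  -- the two reconstructed strings coincide
  set scB := (PySem.List.pyRange 1 (z.length : Int) 1).foldl (bStep z (z.length : Int)) ([97], 98)
    with hscB
  have hseq : ((PySem.List.pyRange 1 (z.length : Int) 1).foldl
      (aStep z (z.length : Int)) (pvPad z.length [97], 98)).1 = scB.1 := by
    rw [hs, pad_eq_self hslen]
  rw [h0, hseq]
  -- prefix phase: both folds append the maximal borders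
  have hinv : ∀ t (ht : t < ([(0 : Int)] : List Int).length),
      ([(0 : Int)] : List Int)[t] = ((pvMB scB.1 (t + 1) : Nat) : Int) := by
    intro t ht
    simp only [List.length_cons, List.length_nil] at ht
    have ht0 : t = 0 := by omega
    subst ht0
    simp [pvMB, Nat.findGreatest_zero]
  have hone : ((1 : Nat) : Int) = (1 : Int) := by norm_num
  obtain ⟨hp, _⟩ := phase2 scB.1 z.length (z.length - 1) 1 [0] rfl (le_refl 1)
    (by simp) hn hinv
  rw [hone] at hp
  rw [replicate_eq_pad z.length hn, hp, pad_eq_self]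
  obtain ⟨_, hl⟩ := phase2 scB.1 z.length (z.length - 1) 1 [0] rfl (le_refl 1)
    (by simp) hn hinv
  rw [hone] at hl
  exact hl
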